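-- pv_equiv track=rewrite | github.com/kuldeeepy/Data-Structures-and-Algorithms | Array/main.py | weightLift
-- ===== SOURCE A (Python) =====
-- def weightLift(nums):
--     harry = john = 0
--     flag, weight = True, 0
--     a, z = 0, len(nums)-1
--     while a <= z:
--         curr_lift = 0
--         if flag:
--             while a <= z and curr_lift <= weight:
--                 curr_lift += nums[a]
--                 a += 1
--             harry += curr_lift
--             flag = False
--         else:
--             while a <= z and curr_lift <= weight:
--                 curr_lift += nums[z]
--                 z -= 1
--             john += curr_lift
--             flag = True
--         weight = curr_lift
--     return [harry, john]
-- ===== SOURCE B (Python) =====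
-- def weightLift(nums):
--     # Build the list of chunk totals first (taking each chunk from the front
--     # and reversing the remainder to swap ends), then route by parity.
--     rest = list(nums)
--     chunks = []
--     weight = 0
--     while rest:
--         curr = 0
--         while rest and curr <= weight:
--             curr += rest.pop(0)
--         chunks.append(curr)
--         weight = curr
--         rest.reverse()
--     harry = john = 0
--     for i, c in enumerate(chunks):
--         if i % 2 == 0:
--             harry += c
--         else:
--             john += c
--     return [harry, john]
-- ===== Notes on version B (the rewrite author's own statement) =====
-- stated objective: alternative
-- what changed: Replaces the two-pointer state machine with a toggling flag and two mirrored inner loops by a single front-consuming chunk builder that reverses the remainder after each chunk, collecting chunk totals into a list and routing them to harry/john afterwards by index parity.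
import Mathlib
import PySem

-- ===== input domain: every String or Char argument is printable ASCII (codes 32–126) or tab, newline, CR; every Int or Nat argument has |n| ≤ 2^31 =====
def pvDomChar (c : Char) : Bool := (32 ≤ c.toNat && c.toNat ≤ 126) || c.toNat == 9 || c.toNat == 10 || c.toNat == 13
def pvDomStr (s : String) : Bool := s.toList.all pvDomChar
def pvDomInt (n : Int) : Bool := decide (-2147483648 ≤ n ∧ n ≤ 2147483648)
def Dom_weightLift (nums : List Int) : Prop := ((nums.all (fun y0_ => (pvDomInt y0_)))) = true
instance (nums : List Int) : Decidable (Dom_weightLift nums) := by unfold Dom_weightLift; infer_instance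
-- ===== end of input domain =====

-- B restructures A: instead of a flag-toggling two-pointer loop adding into harry/john,
-- B builds the list of chunk totals (always consuming from the front, reversing the
-- remainder after each chunk) and then sums them by index parity. Same return value.
-- The while-loops are ported with an explicit fuel counter, a pure totality guard:
-- the fuel passed at each call site is proved sufficient, so no branch ever runs dry.

-- ===== PORT A =====
-- A's forward inner while-loop: `while a <= z and curr_lift <= weight: curr_lift += nums[a]; a += 1`.
-- nums[a] is ported as pyGetD (exact here: the loop only reads indices 0 ≤ a ≤ z < len(nums)).
def innerF (nums : List Int) (z weight : Int) : Nat → Int → Int → Int × Int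
  | 0, a, curr => (curr, a)
  | n + 1, a, curr =>
      if a ≤ z ∧ curr ≤ weight then
        innerF nums z weight n (a + 1) (curr + PySem.List.pyGetD nums a 0)
      else (curr, a)

-- A's backward inner while-loop: `while a <= z and curr_lift <= weight: curr_lift += nums[z]; z -= 1`.
def innerB (nums : List Int) (a weight : Int) : Nat → Int → Int → Int × Int
  | 0, z, curr => (curr, z)
  | n + 1, z, curr =>
      if a ≤ z ∧ curr ≤ weight then
        innerB nums a weight n (z - 1) (curr + PySem.List.pyGetD nums z 0)
      else (curr, z)

-- A's outer while-loop over the state (harry, john, flag, weight, a, z); the inner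
-- loops get fuel (z+1-a).toNat, one unit per remaining index, which never runs out.
def outer (nums : List Int) : Nat → Int → Int → Bool → Int → Int → Int → List Int
  | 0, harry, john, _, _, _, _ => [harry, john]
  | n + 1, harry, john, flag, weight, a, z =>
      if a ≤ z then
        if flag then
          outer nums n (harry + (innerF nums z weight (z + 1 - a).toNat a 0).1) john false
            (innerF nums z weight (z + 1 - a).toNat a 0).1
            (innerF nums z weight (z + 1 - a).toNat a 0).2 z
        else
          outer nums n harry (john + (innerB nums a weight (z + 1 - a).toNat z 0).1) true
            (innerB nums a weight (z + 1 - a).toNat z 0).1 a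
            (innerB nums a weight (z + 1 - a).toNat z 0).2
      else [harry, john]

def weightLift (nums : List Int) : List Int :=
  outer nums (2 * nums.length + 2) 0 0 true 0 0 ((nums.length : Int) - 1)

-- ===== PORT B =====
-- `while rest and curr <= weight: curr += rest.pop(0)`; returns (curr, rest).
def chunkF : List Int → Int → Int → Int × List Int
  | [], curr, _ => (curr, [])
  | x :: xs, curr, weight =>
      if curr ≤ weight then chunkF xs (curr + x) weight else (curr, x :: xs)

-- the final `for i, c in enumerate(chunks)` routing loop; Python's i % 2 with the
-- positive modulus 2 agrees with Lean's Int.emod `%` for every i.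
def finish (chunks : List Int) : List Int :=
  let p := (PySem.List.enumerate chunks 0).foldl
    (fun (hj : Int × Int) ic =>
      if ic.1 % 2 = 0 then (hj.1 + ic.2, hj.2) else (hj.1, hj.2 + ic.2)) (0, 0)
  [p.1, p.2]

-- B's outer while-loop: take a chunk from the front, record it, reverse the remainder.
def loopB : Nat → List Int → List Int → Int → List Int
  | 0, _, chunks, _ => finish chunks
  | n + 1, rest, chunks, weight =>
      match rest with
      | [] => finish chunks
      | x :: xs =>
          loopB n (chunkF (x :: xs) 0 weight).2.reverse
            (chunks ++ [(chunkF (x :: xs) 0 weight).1]) (chunkF (x :: xs) 0 weight).1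

def weightLift_alt (nums : List Int) : List Int := loopB (2 * nums.length + 2) nums [] 0

-- ===== PRECONDITION & SPEC =====
def Spec_weightLift (nums : List Int) (out : List Int) : Prop := out = weightLift_alt nums
instance (nums : List Int) (out : List Int) : Decidable (Spec_weightLift nums out) := by unfold Spec_weightLift; infer_instance

-- ===== CLAIM (what is proved, stated in full; the proofs are below) =====
def Claim_equal_weightLift : Prop := ∀ (nums : List Int), Dom_weightLift nums → Spec_weightLift nums (weightLift nums)

-- ===== LEMMAS AND PROOFS =====

theorem chunkF_len (rest : List Int) : ∀ (curr weight : Int),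
    (chunkF rest curr weight).2.length ≤ rest.length := by
  induction rest with
  | nil => intro curr weight; simp [chunkF]
  | cons x xs ih =>
      intro curr weight
      rw [chunkF]
      split
      · exact Nat.le_succ_of_le (ih _ _)
      · exact le_refl _

theorem chunkF_stop (rest : List Int) (curr weight : Int) (h : ¬ curr ≤ weight) :
    chunkF rest curr weight = (curr, rest) := by
  cases rest <;> simp [chunkF, h]

theorem chunkF_measure (x : Int) (xs : List Int) (weight : Int) :
    2 * (chunkF (x :: xs) 0 weight).2.reverse.length
      + (if (chunkF (x :: xs) 0 weight).1 < 0 then 1 else 0)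
    < 2 * (x :: xs).length + (if weight < 0 then 1 else 0) := by
  by_cases hw : (0 : Int) ≤ weight
  · have : (chunkF (x :: xs) 0 weight).2.length ≤ xs.length := by
      simpa [chunkF, hw] using chunkF_len xs (0 + x) weight
    simp only [List.length_reverse, List.length_cons]
    split_ifs <;> omega
  · rw [chunkF_stop _ _ _ (by omega)]
    simp only [List.length_reverse]
    rw [if_neg (by omega), if_pos (by omega)]
    omega

-- the chunk totals produced by B's loop, as a standalone list (proof-side helper)
def mid (rest : List Int) (weight : Int) : List Int :=
  match rest with
  | [] => []
  | x :: xs =>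
      (chunkF (x :: xs) 0 weight).1
        :: mid (chunkF (x :: xs) 0 weight).2.reverse (chunkF (x :: xs) 0 weight).1
termination_by 2 * rest.length + (if weight < 0 then 1 else 0)
decreasing_by exact chunkF_measure x xs weight

-- (sum of even-indexed elements, sum of odd-indexed elements)
def altS : List Int → Int × Int
  | [] => (0, 0)
  | c :: cs => ((altS cs).2 + c, (altS cs).1)

theorem loopB_eq : ∀ (n : Nat) (rest chunks : List Int) (weight : Int),
    2 * rest.length + (if weight < 0 then 1 else 0) + 1 ≤ n →
    loopB n rest chunks weight = finish (chunks ++ mid rest weight) := by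
  intro n
  induction n with
  | zero => intro rest chunks weight hn; split_ifs at hn <;> omega
  | succ n ih =>
      intro rest chunks weight hn
      match rest with
      | [] => rw [loopB, mid]; simp
      | x :: xs =>
          rw [loopB, mid]
          rw [ih _ _ _ (by have := chunkF_measure x xs weight; omega)]
          simp

theorem finish_fold (cs : List Int) (i h j : Int) :
    (PySem.List.enumerate cs i).foldl
      (fun (hj : Int × Int) ic =>
        if ic.1 % 2 = 0 then (hj.1 + ic.2, hj.2) else (hj.1, hj.2 + ic.2)) (h, j)
    = if i % 2 = 0 then (h + (altS cs).1, j + (altS cs).2)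
      else (h + (altS cs).2, j + (altS cs).1) := by
  induction cs generalizing i h j with
  | nil => simp [PySem.List.enumerate, altS]
  | cons c cs ih =>
      rw [show PySem.List.enumerate (c :: cs) i = (i, c) :: PySem.List.enumerate cs (i + 1) from by
        simp [PySem.List.enumerate_eq_zipIdx_map, PySem.List.enumerate]]
      by_cases hp : i % 2 = 0
      · have hp1 : ¬ (i + 1) % 2 = 0 := by omega
        simp only [List.foldl_cons, hp, hp1, ih, if_true, if_false, Prod.ext_iff, altS]
        constructor <;> first | trivial | ring
      · have hp1 : (i + 1) % 2 = 0 := by omega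
        simp only [List.foldl_cons, hp, hp1, ih, if_true, if_false, Prod.ext_iff, altS]
        constructor <;> first | trivial | ring

theorem finish_eq (cs : List Int) : finish cs = [(altS cs).1, (altS cs).2] := by
  unfold finish
  rw [finish_fold]
  norm_num

-- the segment nums[a..z] (inclusive) that A's pointers delimit
def seg (nums : List Int) (a z : Int) : List Int :=
  (nums.drop a.toNat).take (z + 1 - a).toNat

theorem seg_nil (nums : List Int) (a z : Int) (h : z < a) : seg nums a z = [] := by
  unfold seg
  rw [show (z + 1 - a).toNat = 0 by omega]
  simp

theorem pyGetD_toNat (nums : List Int) (a : Int) (h0 : 0 ≤ a) (h1 : a.toNat < nums.length) :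
    PySem.List.pyGetD nums a 0 = nums[a.toNat] := by
  have := PySem.List.pyGetD_natCast (xs := nums) (n := a.toNat) (d := 0)
  rw [Int.toNat_of_nonneg h0] at this
  rw [this, List.getD_eq_getElem _ _ h1]

theorem seg_cons (nums : List Int) (a z : Int) (h0 : 0 ≤ a) (haz : a ≤ z)
    (hz : z < (nums.length : Int)) :
    seg nums a z = PySem.List.pyGetD nums a 0 :: seg nums (a + 1) z := by
  have ha : a.toNat < nums.length := by omega
  unfold seg
  rw [List.drop_eq_getElem_cons ha]
  rw [show (z + 1 - a).toNat = (z + 1 - (a + 1)).toNat + 1 by omega]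
  rw [List.take_succ_cons, pyGetD_toNat nums a h0 ha,
    show (a + 1).toNat = a.toNat + 1 by omega]

theorem seg_concat (nums : List Int) (a z : Int) (h0 : 0 ≤ a) (haz : a ≤ z)
    (hz : z < (nums.length : Int)) :
    seg nums a z = seg nums a (z - 1) ++ [PySem.List.pyGetD nums z 0] := by
  have hz0 : 0 ≤ z := by omega
  have hzn : z.toNat < nums.length := by omega
  unfold seg
  rw [pyGetD_toNat nums z hz0 hzn]
  rw [show (z + 1 - a).toNat = (z - 1 + 1 - a).toNat + 1 by omega]
  rw [List.take_add_one]
  have hlt : (z - 1 + 1 - a).toNat < (nums.drop a.toNat).length := by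
    simp; omega
  rw [List.getElem?_eq_getElem hlt]
  simp only [Option.toList_some]
  congr 2
  rw [List.getElem_drop]
  congr 1
  omega

-- forward inner loop ≡ chunkF on the forward segment (fuel covers the segment)
theorem innerF_seg (nums : List Int) (z weight : Int) (hz : z < (nums.length : Int)) :
    ∀ (n : Nat) (a curr : Int), (z + 1 - a).toNat ≤ n → 0 ≤ a →
      chunkF (seg nums a z) curr weight
        = ((innerF nums z weight n a curr).1, seg nums (innerF nums z weight n a curr).2 z) := by
  intro n
  induction n with
  | zero =>
      intro a curr hn h0
      have : z < a := by omega
      rw [seg_nil nums a z this, innerF]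
      simp [chunkF, seg_nil nums a z this]
  | succ n ih =>
      intro a curr hn h0
      rw [innerF]
      split
      · next h =>
          rw [seg_cons nums a z h0 h.1 hz, chunkF, if_pos h.2]
          exact ih (a + 1) _ (by omega) (by omega)
      · next h =>
          by_cases hw : curr ≤ weight
          · have : z < a := by omega
            rw [seg_nil nums a z this]
            simp [chunkF]
          · rw [chunkF_stop _ _ _ hw]

-- backward inner loop ≡ chunkF on the reversed segment
theorem innerB_seg (nums : List Int) (a weight : Int) (h0 : 0 ≤ a) :
    ∀ (n : Nat) (z curr : Int), (z + 1 - a).toNat ≤ n → z < (nums.length : Int) →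
      chunkF (seg nums a z).reverse curr weight
        = ((innerB nums a weight n z curr).1,
           (seg nums a (innerB nums a weight n z curr).2).reverse) := by
  intro n
  induction n with
  | zero =>
      intro z curr hn hz
      have : z < a := by omega
      rw [seg_nil nums a z this, innerB]
      simp [chunkF, seg_nil nums a z this]
  | succ n ih =>
      intro z curr hn hz
      rw [innerB]
      split
      · next h =>
          rw [seg_concat nums a z h0 h.1 hz]
          simp only [List.reverse_append, List.reverse_cons, List.reverse_nil, List.nil_append,
            List.cons_append]
          rw [chunkF, if_pos h.2]
          exact ih (z - 1) _ (by omega) (by omega)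
      · next h =>
          by_cases hw : curr ≤ weight
          · have : z < a := by omega
            rw [seg_nil nums a z this]
            simp [chunkF, seg_nil nums a z this]
          · rw [chunkF_stop _ _ _ hw]

-- pointer bounds for the inner loops
theorem innerF_snd_lb (nums : List Int) (z weight : Int) : ∀ (n : Nat) (a curr : Int),
    a ≤ (innerF nums z weight n a curr).2
  | 0, a, curr => by rw [innerF]
  | n + 1, a, curr => by
      rw [innerF]
      split
      · next h =>
          have := innerF_snd_lb nums z weight n (a + 1) (curr + PySem.List.pyGetD nums a 0)
          omega
      · exact le_refl a

theorem innerF_snd_ub (nums : List Int) (z weight : Int) : ∀ (n : Nat) (a curr : Int),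
    a ≤ z + 1 → (innerF nums z weight n a curr).2 ≤ z + 1
  | 0, a, curr => fun ha => by rw [innerF]; exact ha
  | n + 1, a, curr => fun ha => by
      rw [innerF]
      split
      · next h =>
          exact innerF_snd_ub nums z weight n (a + 1) _ (by omega)
      · exact ha

theorem innerB_snd_ub (nums : List Int) (a weight : Int) : ∀ (n : Nat) (z curr : Int),
    (innerB nums a weight n z curr).2 ≤ z
  | 0, z, curr => by rw [innerB]
  | n + 1, z, curr => by
      rw [innerB]
      split
      · next h =>
          have := innerB_snd_ub nums a weight n (z - 1) (curr + PySem.List.pyGetD nums z 0)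
          omega
      · exact le_refl z

theorem innerB_snd_lb (nums : List Int) (a weight : Int) : ∀ (n : Nat) (z curr : Int),
    a - 1 ≤ z → a - 1 ≤ (innerB nums a weight n z curr).2
  | 0, z, curr => fun hz => by rw [innerB]; exact hz
  | n + 1, z, curr => fun hz => by
      rw [innerB]
      split
      · next h =>
          exact innerB_snd_lb nums a weight n (z - 1) _ (by omega)
      · exact hz

-- with a ≤ z and 0 ≤ weight the inner loops take at least one step
theorem innerF_progress (nums : List Int) (z weight : Int) (n : Nat) (a : Int)
    (h : a ≤ z) (hw : 0 ≤ weight) (hn : 1 ≤ n) :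
    a + 1 ≤ (innerF nums z weight n a 0).2 := by
  match n, hn with
  | m + 1, _ =>
      rw [innerF, if_pos ⟨h, hw⟩]
      exact innerF_snd_lb nums z weight m (a + 1) _

theorem innerB_progress (nums : List Int) (a weight : Int) (n : Nat) (z : Int)
    (h : a ≤ z) (hw : 0 ≤ weight) (hn : 1 ≤ n) :
    (innerB nums a weight n z 0).2 ≤ z - 1 := by
  match n, hn with
  | m + 1, _ =>
      rw [innerB, if_pos ⟨h, hw⟩]
      exact innerB_snd_ub nums a weight m (z - 1) _

-- with negative weight the inner loops stall and return (0, pointer)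
theorem innerF_stall (nums : List Int) (z weight : Int) (hw : weight < 0) :
    ∀ (n : Nat) (a : Int), innerF nums z weight n a 0 = (0, a)
  | 0, a => by rw [innerF]
  | n + 1, a => by rw [innerF, if_neg (by omega)]

theorem innerB_stall (nums : List Int) (a weight : Int) (hw : weight < 0) :
    ∀ (n : Nat) (z : Int), innerB nums a weight n z 0 = (0, z)
  | 0, z => by rw [innerB]
  | n + 1, z => by rw [innerB, if_neg (by omega)]

-- A's outer loop computes the parity sums of the chunk list of the remaining segment
theorem outer_eq (nums : List Int) :
    ∀ (n : Nat) (harry john : Int) (flag : Bool) (weight a z : Int),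
      2 * (z + 1 - a).toNat + (if weight < 0 then 1 else 0) + 1 ≤ n →
      0 ≤ a → z < (nums.length : Int) →
      outer nums n harry john flag weight a z
        = if flag then
            [harry + (altS (mid (seg nums a z) weight)).1,
             john + (altS (mid (seg nums a z) weight)).2]
          else
            [harry + (altS (mid ((seg nums a z).reverse) weight)).2,
             john + (altS (mid ((seg nums a z).reverse) weight)).1] := by
  intro n
  induction n with
  | zero => intro harry john flag weight a z hn h0 hz; split_ifs at hn <;> omega
  | succ n ih =>
      intro harry john flag weight a z hn h0 hz
      rw [outer]
      by_cases h : a ≤ z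
      · rw [if_pos h]
        cases flag with
        | true =>
            rw [if_pos rfl]
            have hgap : (1 : Nat) ≤ (z + 1 - a).toNat := by omega
            have hlb : a ≤ (innerF nums z weight (z + 1 - a).toNat a 0).2 :=
              innerF_snd_lb nums z weight _ a 0
            have hub : (innerF nums z weight (z + 1 - a).toNat a 0).2 ≤ z + 1 :=
              innerF_snd_ub nums z weight _ a 0 (by omega)
            have hmid : mid (seg nums a z) weight
                = (innerF nums z weight (z + 1 - a).toNat a 0).1
                    :: mid ((seg nums (innerF nums z weight (z + 1 - a).toNat a 0).2 z).reverse)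
                         (innerF nums z weight (z + 1 - a).toNat a 0).1 := by
              rw [seg_cons nums a z h0 h hz, mid, ← seg_cons nums a z h0 h hz,
                  innerF_seg nums z weight hz _ a 0 (le_refl _) h0]
            have hinv : 2 * (z + 1 - (innerF nums z weight (z + 1 - a).toNat a 0).2).toNat
                + (if (innerF nums z weight (z + 1 - a).toNat a 0).1 < 0 then 1 else 0) + 1 ≤ n := by
              by_cases hw : (0 : Int) ≤ weight
              · have hp : a + 1 ≤ (innerF nums z weight (z + 1 - a).toNat a 0).2 :=
                  innerF_progress nums z weight _ a h hw hgap
                split_ifs at hn ⊢ <;> omega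
              · rw [innerF_stall nums z weight (by omega)]
                rw [innerF_stall nums z weight (by omega)] at *
                simp only
                rw [if_neg (by omega)]
                rw [if_pos (by omega)] at hn
                omega
            rw [ih _ _ false _ _ z hinv (by omega) hz]
            rw [if_neg (by simp), hmid]
            simp only [altS, ite_true, List.cons.injEq, and_true, true_and, eq_self_iff_true]
            first | ring | rfl | (constructor <;> first | trivial | ring)
        | false =>
            rw [if_neg (by simp)]
            have hgap : (1 : Nat) ≤ (z + 1 - a).toNat := by omega
            have hub : (innerB nums a weight (z + 1 - a).toNat z 0).2 ≤ z :=
              innerB_snd_ub nums a weight _ z 0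
            have hlb : a - 1 ≤ (innerB nums a weight (z + 1 - a).toNat z 0).2 :=
              innerB_snd_lb nums a weight _ z 0 (by omega)
            have hmid : mid ((seg nums a z).reverse) weight
                = (innerB nums a weight (z + 1 - a).toNat z 0).1
                    :: mid (seg nums a (innerB nums a weight (z + 1 - a).toNat z 0).2)
                         (innerB nums a weight (z + 1 - a).toNat z 0).1 := by
              have hrev : (seg nums a z).reverse
                  = PySem.List.pyGetD nums z 0 :: (seg nums a (z - 1)).reverse := by
                rw [seg_concat nums a z h0 h hz]
                simp
              rw [hrev, mid, ← hrev, innerB_seg nums a weight h0 _ z 0 (le_refl _) hz]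
              simp
            have hinv : 2 * ((innerB nums a weight (z + 1 - a).toNat z 0).2 + 1 - a).toNat
                + (if (innerB nums a weight (z + 1 - a).toNat z 0).1 < 0 then 1 else 0) + 1 ≤ n := by
              by_cases hw : (0 : Int) ≤ weight
              · have hp : (innerB nums a weight (z + 1 - a).toNat z 0).2 ≤ z - 1 :=
                  innerB_progress nums a weight _ z h hw hgap
                split_ifs at hn ⊢ <;> omega
              · rw [innerB_stall nums a weight (by omega)]
                rw [innerB_stall nums a weight (by omega)] at *
                simp only
                rw [if_neg (by omega)]
                rw [if_pos (by omega)] at hn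
                omega
            rw [ih _ _ true _ a _ hinv h0 (by omega)]
            rw [if_pos rfl, hmid]
            simp only [altS, Bool.false_eq_true, ite_false, List.cons.injEq, and_true, true_and,
              eq_self_iff_true]
            first | ring | rfl | (constructor <;> first | trivial | ring)
      · rw [if_neg h]
        have hs : seg nums a z = [] := seg_nil nums a z (by omega)
        rw [hs]
        simp [mid, altS]

-- ===== VERDICT (by name: the statement is the Claim_ definition above) =====
theorem weightLift_spec : Claim_equal_weightLift := by
  intro nums _
  unfold Spec_weightLift weightLift weightLift_alt
  rw [outer_eq nums (2 * nums.length + 2) 0 0 true 0 0 ((nums.length : Int) - 1)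
      (by rw [if_neg (by omega)]; omega) (le_refl 0) (by omega)]
  rw [loopB_eq (2 * nums.length + 2) nums [] 0 (by rw [if_neg (by omega)]; omega),
      List.nil_append, finish_eq]
  have hseg : seg nums 0 ((nums.length : Int) - 1) = nums := by
    unfold seg
    rw [show ((nums.length : Int) - 1 + 1 - 0).toNat = nums.length by omega]
    simp
  rw [if_pos rfl, hseg]
  simp
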